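-- pv_equiv track=rewrite | github.com/iambiggsharaf/robiya | task1.py | maxElementInLongestList
-- ===== SOURCE A (Python) =====
-- def maxElementInLongestList(arr):
--
--    longestList = []
--    maxLength = max(len(x) for x in arr)
--
--    for i in arr:
--
--       if len(i) == maxLength:
--          longestList = i
--          break
--
--    return max(longestList)
-- ===== SOURCE B (Python) =====
-- def maxElementInLongestList(arr):
--     best_len = 0
--     best_max = None
--     for lst in arr:
--         if len(lst) > best_len:
--             best_len = len(lst)
--             best_max = max(lst)
--     return best_max
-- ===== Notes on version B (the rewrite author's own statement) =====
-- stated objective: alternative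
-- what changed: Replaces A's three staged passes (max of lengths, then a scan-with-break for the first list of that length, then max of it) with a single fused pass keeping a running (best length, best max) accumulator, updated on a strict length record.
-- outside the precondition, e.g. on maxElementInLongestList([]): A raises ValueError, B returns None; on maxElementInLongestList([[], []]): A raises ValueError, B returns None
import Mathlib
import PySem

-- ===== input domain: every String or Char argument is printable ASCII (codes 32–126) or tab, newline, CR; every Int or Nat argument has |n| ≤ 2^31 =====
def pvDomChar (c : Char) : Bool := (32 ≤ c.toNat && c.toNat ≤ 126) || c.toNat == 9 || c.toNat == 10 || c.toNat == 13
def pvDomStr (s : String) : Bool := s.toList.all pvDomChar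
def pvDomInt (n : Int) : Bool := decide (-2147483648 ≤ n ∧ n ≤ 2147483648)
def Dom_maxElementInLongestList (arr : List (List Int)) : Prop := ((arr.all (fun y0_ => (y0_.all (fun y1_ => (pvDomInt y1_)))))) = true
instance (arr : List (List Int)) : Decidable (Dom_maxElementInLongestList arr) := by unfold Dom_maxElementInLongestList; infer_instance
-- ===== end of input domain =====

-- B fuses A's three staged passes into one pass with a running (best length, best max) accumulator: alternative decomposition, same cost.

-- ===== PORT A =====
-- the for-loop with break: first list whose length equals maxLength, else the initial accumulator
def pvFindLoop (maxLength : Int) : List (List Int) → List Int → List Int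
  | [], acc => acc
  | i :: t, acc => if (i.length : Int) = maxLength then i else pvFindLoop maxLength t acc

def maxElementInLongestList (arr : List (List Int)) : Int :=
  -- max(len(x) for x in arr); Python raises on empty arr (none here), excluded by Pre_
  let maxLength : Int := (PySem.List.max? (arr.map (fun x => (x.length : Int))) (fun y => y)).getD 0
  let longestList := pvFindLoop maxLength arr []
  -- max(longestList); Python raises on empty longestList (none here), excluded by Pre_
  (PySem.List.max? longestList (fun y => y)).getD 0

-- ===== PORT B =====
-- one step of Source B's loop body on the state (best_len, best_max)
def pvBStep (st : Int × Option Int) (lst : List Int) : Int × Option Int :=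
  if (lst.length : Int) > st.1 then ((lst.length : Int), PySem.List.max? lst (fun y => y))
  else st

def maxElementInLongestList_alt (arr : List (List Int)) : Int :=
  -- best_max is None until the first nonempty record; .getD 0 stands for the None never
  -- returned inside Pre_ (Python B returns None there, outside Pre_)
  (arr.foldl pvBStep (0, none)).2.getD 0

-- ===== PRECONDITION & SPEC =====
-- Pre_ excludes exactly the inputs on which Python A raises ValueError: the empty list
-- (max() of an empty generator) and lists whose sublists are all empty (max([]) on the
-- selected longest list).
def Pre_maxElementInLongestList (arr : List (List Int)) : Prop := ∃ x ∈ arr, x ≠ []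
instance (arr : List (List Int)) : Decidable (Pre_maxElementInLongestList arr) := by unfold Pre_maxElementInLongestList; infer_instance
def pvWitness_maxElementInLongestList : List (List Int) := [[1, 2], [3]]
def Spec_maxElementInLongestList (arr : List (List Int)) (out : Int) : Prop := out = maxElementInLongestList_alt arr
instance (arr : List (List Int)) (out : Int) : Decidable (Spec_maxElementInLongestList arr out) := by unfold Spec_maxElementInLongestList; infer_instance

-- ===== CLAIM (what is proved, stated in full; the proofs are below) =====
def Claim_equal_maxElementInLongestList : Prop := ∀ (arr : List (List Int)), Dom_maxElementInLongestList arr → Pre_maxElementInLongestList arr → Spec_maxElementInLongestList arr (maxElementInLongestList arr)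

-- ===== LEMMAS AND PROOFS =====

-- one step of the running argmax (key = length, earlier element wins ties)
def pvStep (a : List Int) (o : Option (List Int)) : List Int :=
  match o with
  | none => a
  | some m => if (a.length : Int) < (m.length : Int) then m else a

-- first length-maximal element: reference form of max?(·, key=len)
def pvAm : List (List Int) → Option (List Int)
  | [] => none
  | x :: t => some (pvStep x (pvAm t))

-- one step of the running max on Int (identity key)
def pvStepI (a : Int) (o : Option Int) : Int :=
  match o with
  | none => a
  | some m => if a < m then m else a

def pvAmI : List Int → Option Int
  | [] => none
  | v :: t => some (pvStepI v (pvAmI t))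

lemma len_le_pvStep (a : List Int) (o : Option (List Int)) :
    (a.length : Int) ≤ ((pvStep a o).length : Int) := by
  cases o with
  | none => simp [pvStep]
  | some m => simp only [pvStep]; split_ifs <;> omega

lemma len_le_pvStep' (m : List Int) (a : List Int) :
    (m.length : Int) ≤ ((pvStep a (some m)).length : Int) := by
  simp only [pvStep]; split_ifs <;> omega

lemma pvFoldlI_char (t : List Int) (a : Int) :
    List.foldl
      (fun acc x =>
        match acc with
        | none => some x
        | some m => if m < x then some x else some m)
      (some a) t
    = some (pvStepI a (pvAmI t)) := by
  induction t generalizing a with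
  | nil => simp [pvAmI, pvStepI]
  | cons b t ih =>
    simp only [List.foldl_cons]
    show List.foldl _ (if a < b then some b else some a) t = _
    by_cases h1 : a < b
    · rw [if_pos h1, ih b]
      simp only [pvAmI]
      have hb : b ≤ pvStepI b (pvAmI t) := by
        cases ho : pvAmI t with
        | none => simp [pvStepI]
        | some m => simp only [pvStepI]; split_ifs <;> omega
      cases ho : pvAmI t with
      | none => simp only [pvStepI]; rw [if_pos h1]
      | some m =>
        simp only [pvStepI] at hb ⊢
        rw [ho] at hb
        split_ifs <;> first | rfl | omega
    · rw [if_neg h1, ih a]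
      simp only [pvAmI]
      cases ho : pvAmI t with
      | none => simp only [pvStepI]; rw [if_neg h1]
      | some m =>
        simp only [pvStepI]
        split_ifs <;> first | rfl | omega

lemma max?I_eq_pvAmI (xs : List Int) :
    PySem.List.max? xs (fun y => y) = pvAmI xs := by
  cases xs with
  | nil => rfl
  | cons a t =>
    simp only [PySem.List.max?, List.foldl_cons, pvAmI]
    convert pvFoldlI_char t a using 2
    funext acc x
    cases acc <;> rfl

lemma pvAmI_map (arr : List (List Int)) :
    pvAmI (arr.map (fun x => (x.length : Int))) = (pvAm arr).map (fun x => (x.length : Int)) := by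
  induction arr with
  | nil => rfl
  | cons a t ih =>
    simp only [List.map_cons, pvAm, pvAmI, ih]
    cases h : pvAm t with
    | none => simp [pvStep, pvStepI]
    | some m =>
      simp only [Option.map_some, pvStep, pvStepI]
      split_ifs <;> simp

lemma pvFindLoop_of_pvAm (arr : List (List Int)) (m : List Int) (acc : List Int)
    (h : pvAm arr = some m) : pvFindLoop ((m.length : Int)) arr acc = m := by
  induction arr generalizing m with
  | nil => simp [pvAm] at h
  | cons a t ih =>
    simp only [pvAm] at h
    cases ht : pvAm t with
    | none =>
      rw [ht] at h
      simp only [pvStep] at h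
      obtain rfl := Option.some.inj h
      simp [pvFindLoop]
    | some mt =>
      rw [ht] at h
      simp only [pvStep] at h
      by_cases hlt : (a.length : Int) < (mt.length : Int)
      · rw [if_pos hlt] at h
        obtain rfl := Option.some.inj h
        simp only [pvFindLoop, if_neg (by omega : ¬ ((a.length : Int) = (mt.length : Int)))]
        exact ih mt ht
      · rw [if_neg hlt] at h
        obtain rfl := Option.some.inj h
        simp [pvFindLoop]

-- if everything in arr has length ≤ the current best, the fold leaves the state untouched
lemma pvBFold_id (arr : List (List Int)) (m : List Int) (st : Int × Option Int)
    (h : pvAm arr = some m) (hle : (m.length : Int) ≤ st.1) :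
    arr.foldl pvBStep st = st := by
  induction arr generalizing m st with
  | nil => rfl
  | cons a t ih =>
    simp only [pvAm] at h
    obtain rfl := Option.some.inj h
    have ha : (a.length : Int) ≤ st.1 := le_trans (len_le_pvStep a (pvAm t)) hle
    simp only [List.foldl_cons, pvBStep, if_neg (by omega : ¬ ((a.length : Int) > st.1))]
    cases ht : pvAm t with
    | none =>
      cases t with
      | nil => rfl
      | cons b u => simp [pvAm] at ht
    | some mt =>
      have hmt : (mt.length : Int) ≤ st.1 := by
        rw [ht] at hle; exact le_trans (len_le_pvStep' mt a) hle
      exact ih mt st ht hmt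

-- the fold from any state whose best is beaten by the overall first longest list
lemma pvBFold_char (arr : List (List Int)) (m : List Int) (st : Int × Option Int)
    (h : pvAm arr = some m) (hgt : st.1 < (m.length : Int)) :
    arr.foldl pvBStep st = ((m.length : Int), PySem.List.max? m (fun y => y)) := by
  induction arr generalizing m st with
  | nil => simp [pvAm] at h
  | cons a t ih =>
    simp only [pvAm] at h
    cases ht : pvAm t with
    | none =>
      rw [ht] at h
      simp only [pvStep] at h
      obtain rfl := Option.some.inj h
      have : t = [] := by
        cases t with
        | nil => rfl
        | cons b u => simp [pvAm] at ht
      subst this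
      simp [pvBStep, if_pos hgt]
    | some mt =>
      rw [ht] at h
      simp only [pvStep] at h
      by_cases hlt : (a.length : Int) < (mt.length : Int)
      · rw [if_pos hlt] at h
        obtain rfl := Option.some.inj h
        simp only [List.foldl_cons, pvBStep]
        by_cases hab : (a.length : Int) > st.1
        · rw [if_pos hab]
          exact ih mt ((a.length : Int), PySem.List.max? a (fun y => y)) ht hlt
        · rw [if_neg hab]
          exact ih mt st ht hgt
      · rw [if_neg hlt] at h
        obtain rfl := Option.some.inj h
        simp only [List.foldl_cons, pvBStep, if_pos hgt]
        exact pvBFold_id t mt _ ht (by omega)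

-- every member length is ≤ the first-longest length
lemma pvAm_ge (arr : List (List Int)) (m x : List Int)
    (h : pvAm arr = some m) (hx : x ∈ arr) : (x.length : Int) ≤ (m.length : Int) := by
  induction arr generalizing m with
  | nil => cases hx
  | cons a t ih =>
    simp only [pvAm] at h
    obtain rfl := Option.some.inj h
    cases hx with
    | head => exact len_le_pvStep _ (pvAm t)
    | tail _ hx' =>
      cases ht : pvAm t with
      | none =>
        cases t with
        | nil => cases hx'
        | cons b u => simp [pvAm] at ht
      | some mt =>
        exact le_trans (ih mt ht hx') (len_le_pvStep' mt a)

-- ===== VERDICT (by name: the statement is the Claim_ definition above) =====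
theorem maxElementInLongestList_spec : Claim_equal_maxElementInLongestList := by
  intro arr _ hpre
  unfold Spec_maxElementInLongestList maxElementInLongestList maxElementInLongestList_alt
  obtain ⟨x, hx, hxne⟩ := hpre
  cases hm : pvAm arr with
  | none =>
    exfalso
    cases arr with
    | nil => cases hx
    | cons a t => simp [pvAm] at hm
  | some m =>
    have hlen : (0 : Int) < (m.length : Int) := by
      have h1 := pvAm_ge arr m x hm hx
      have h2 : 0 < x.length := List.length_pos_of_ne_nil hxne
      omega
    rw [pvBFold_char arr m (0, none) hm hlen]
    simp only [max?I_eq_pvAmI, pvAmI_map, hm, Option.map_some, Option.getD_some]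
    rw [pvFindLoop_of_pvAm arr m [] hm]
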